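-- pv_equiv track=rewrite | github.com/fuyuxiang/echo-agent | echo_agent/utils/text.py | _last_boundary_cut
-- ===== SOURCE A (Python) =====
-- def _last_boundary_cut(text: str, boundaries: tuple[str, ...], max_len: int, min_cut: int) -> int:
--     best = 0
--     for boundary in boundaries:
--         start = 0
--         while True:
--             idx = text.find(boundary, start, max_len)
--             if idx < 0:
--                 break
--             candidate = idx + len(boundary)
--             if min_cut <= candidate <= max_len:
--                 best = max(best, candidate)
--             start = idx + len(boundary)
--     return best
-- ===== SOURCE B (Python) =====
-- def _last_boundary_cut(text: str, boundaries, max_len: int, min_cut: int) -> int: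
--     # Split the window once per boundary; the split points are exactly the
--     # boundary occurrences, so a running prefix sum over the pieces yields
--     # every candidate cut position.
--     window = text[:max(max_len, 0)]
--     best = 0
--     for b in boundaries:
--         pos = 0
--         for part in window.split(b)[:-1]:
--             pos += len(part) + len(b)
--             if pos >= min_cut:
--                 best = max(best, pos)
--     return best
-- ===== Notes on version B (the rewrite author's own statement) =====
-- stated objective: idiomatic
-- what changed: Replaces A's per-boundary find-and-jump while-loop with one str.split per boundary followed by a prefix-sum over the pieces, whose cumulative lengths are exactly the candidate cut positions; Pre_ excludes boundary lists containing the empty string, on which A loops forever.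
import Mathlib
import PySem

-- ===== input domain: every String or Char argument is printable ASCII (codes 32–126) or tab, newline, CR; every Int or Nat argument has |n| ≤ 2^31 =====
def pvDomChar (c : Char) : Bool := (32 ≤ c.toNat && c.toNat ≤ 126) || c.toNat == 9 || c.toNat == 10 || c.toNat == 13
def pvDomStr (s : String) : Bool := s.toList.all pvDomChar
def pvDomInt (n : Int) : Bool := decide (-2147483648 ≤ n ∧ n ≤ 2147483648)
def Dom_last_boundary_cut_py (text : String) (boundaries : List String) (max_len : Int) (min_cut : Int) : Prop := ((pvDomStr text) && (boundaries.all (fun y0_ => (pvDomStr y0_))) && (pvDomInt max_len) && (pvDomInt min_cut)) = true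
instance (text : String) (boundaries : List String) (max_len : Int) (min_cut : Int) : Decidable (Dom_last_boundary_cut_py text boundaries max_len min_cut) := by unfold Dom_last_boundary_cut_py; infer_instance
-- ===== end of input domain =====

-- B replaces A's per-boundary find-and-jump while-loop by one split per boundary
-- plus a prefix sum over the pieces (objective: idiomatic).

-- ===== PORT A =====
-- the 'while True:' find loop as fuel recursion; under Pre_ (no empty boundary) the
-- start index strictly increases, so fuel length+2 is never exhausted
def pvALoop (cs b : List Char) (max_len min_cut : Int) : Nat → Int → Nat → Int
  | _, best, 0 => best
  | start, best, fuel+1 =>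
    let idx := PySem.Chars.findFrom cs b (start : Int) (some max_len)
    if idx < 0 then best
    else
      pvALoop cs b max_len min_cut (idx.toNat + b.length)
        (if min_cut ≤ idx + (b.length : Int) ∧ idx + (b.length : Int) ≤ max_len then
          max best (idx + (b.length : Int)) else best)
        fuel

def last_boundary_cut_py (text : String) (boundaries : List String) (max_len : Int) (min_cut : Int) : Int :=
  boundaries.foldl
    (fun best boundary => pvALoop text.toList boundary.toList max_len min_cut 0 best (text.toList.length + 2)) 0

-- ===== PORT B =====
-- window.split(b)[:-1] is ported as splitOn … |>.dropLast ([:-1] on a list is exactly dropLast)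
def last_boundary_cut_py_alt (text : String) (boundaries : List String) (max_len : Int) (min_cut : Int) : Int :=
  let window := PySem.List.slice text.toList none (some (max max_len 0))
  boundaries.foldl (fun best b =>
    ((PySem.Chars.splitOn window b.toList).dropLast.foldl
      (fun (st : Int × Int) part =>
        let pos := st.1 + (part.length : Int) + (b.toList.length : Int)
        (pos, if min_cut ≤ pos then max st.2 pos else st.2)) (0, best)).2) 0

-- ===== PRECONDITION & SPEC =====
-- Pre_ excludes boundary lists containing the empty string: on those A's find loop
-- never advances its start index, so A loops forever and returns nothing.
def Pre_last_boundary_cut_py (text : String) (boundaries : List String) (max_len : Int) (min_cut : Int) : Prop :=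
  ∀ s ∈ boundaries, s ≠ ""
instance (text : String) (boundaries : List String) (max_len : Int) (min_cut : Int) : Decidable (Pre_last_boundary_cut_py text boundaries max_len min_cut) := by unfold Pre_last_boundary_cut_py; infer_instance
def pvWitness_last_boundary_cut_py : String × List String × Int × Int := ("hello world", ["l", "wor"], 8, 2)

def Spec_last_boundary_cut_py (text : String) (boundaries : List String) (max_len : Int) (min_cut : Int) (out : Int) : Prop := out = last_boundary_cut_py_alt text boundaries max_len min_cut
instance (text : String) (boundaries : List String) (max_len : Int) (min_cut : Int) (out : Int) : Decidable (Spec_last_boundary_cut_py text boundaries max_len min_cut out) := by unfold Spec_last_boundary_cut_py; infer_instance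

-- ===== CLAIM (what is proved, stated in full; the proofs are below) =====
def Claim_equal_last_boundary_cut_py : Prop := ∀ (text : String) (boundaries : List String) (max_len : Int) (min_cut : Int), Dom_last_boundary_cut_py text boundaries max_len min_cut → Pre_last_boundary_cut_py text boundaries max_len min_cut → Spec_last_boundary_cut_py text boundaries max_len min_cut (last_boundary_cut_py text boundaries max_len min_cut)

-- ===== LEMMAS AND PROOFS =====

-- effective end index of Python's find(b, start, max_len) window, as a Nat
def pvE (L : Nat) (m : Int) : Nat :=
  if (L : Int) < m then L else if m < 0 then (m + L).toNat else m.toNat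

-- reference machine: greedy scan for one boundary over the window cs' = take E cs,
-- jumping from a match at p to p + |b|
def pvG (cs' b : List Char) (min_cut max_len : Int) (p : Nat) (best : Int) : Int :=
  if h : p < cs'.length ∧ b ≠ [] then
    if b <+: cs'.drop p then
      pvG cs' b min_cut max_len (p + b.length)
        (if min_cut ≤ (p : Int) + b.length ∧ (p : Int) + b.length ≤ max_len then
          max best ((p : Int) + b.length) else best)
    else pvG cs' b min_cut max_len (p + 1) best
  else best
termination_by cs'.length - p
decreasing_by
  · have : 0 < b.length := List.length_pos_iff.mpr h.2
    omega
  · omega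

theorem pv_foldl_const {α β : Type} (l : List α) (b : β) : l.foldl (fun y _ => y) b = b := by
  induction l generalizing b with
  | nil => rfl
  | cons x l ih => simp only [List.foldl_cons]; exact ih b

theorem pvG_of_len_le (cs' b : List Char) (mc ml : Int) (p : Nat) (best : Int)
    (h : cs'.length ≤ p) : pvG cs' b mc ml p best = best := by
  rw [pvG, dif_neg]
  intro hc
  exact absurd hc.1 (Nat.not_lt.mpr h)

theorem pvG_stop (cs' b : List Char) (mc ml : Int) :
    ∀ (p : Nat) (best : Int), ¬ b <:+: cs'.drop p → pvG cs' b mc ml p best = best := by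
  suffices H : ∀ (d p : Nat) (best : Int), cs'.length - p ≤ d → ¬ b <:+: cs'.drop p →
      pvG cs' b mc ml p best = best by
    intro p best h
    exact H (cs'.length - p) p best le_rfl h
  intro d
  induction d with
  | zero =>
    intro p best hd _
    exact pvG_of_len_le cs' b mc ml p best (by omega)
  | succ d ih =>
    intro p best hd hinf
    by_cases hc : p < cs'.length ∧ b ≠ []
    · rw [pvG, dif_pos hc]
      have hnp : ¬ b <+: cs'.drop p := fun h => hinf h.isInfix
      rw [if_neg hnp]
      apply ih
      · omega
      · intro h
        apply hinf
        have hsfx : cs'.drop (p + 1) <:+ cs'.drop p := by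
          have h1 := List.drop_suffix 1 (cs'.drop p)
          rwa [List.drop_drop] at h1
        exact h.trans hsfx.isInfix
    · rw [pvG, dif_neg hc]

theorem pvG_skip (cs' b : List Char) (mc ml : Int) :
    ∀ (q p : Nat) (best : Int), p ≤ q →
      (∀ i, p ≤ i → i < q → ¬ b <+: cs'.drop i) →
      pvG cs' b mc ml p best = pvG cs' b mc ml q best := by
  intro q
  suffices H : ∀ (d p : Nat) (best : Int), q - p ≤ d → p ≤ q →
      (∀ i, p ≤ i → i < q → ¬ b <+: cs'.drop i) →
      pvG cs' b mc ml p best = pvG cs' b mc ml q best by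
    intro p best hpq hno
    exact H (q - p) p best le_rfl hpq hno
  intro d
  induction d with
  | zero =>
    intro p best hd hpq _
    have : p = q := by omega
    rw [this]
  | succ d ih =>
    intro p best hd hpq hno
    rcases Nat.eq_or_lt_of_le hpq with h | h
    · rw [h]
    · by_cases hc : p < cs'.length ∧ b ≠ []
      · rw [pvG, dif_pos hc, if_neg (hno p le_rfl h)]
        exact ih (p + 1) best (by omega) (by omega) (fun i h1 h2 => hno i (by omega) h2)
      · rw [pvG, dif_neg hc]
        by_cases hb : b = []
        · subst hb
          rw [pvG, dif_neg (fun hc' => hc'.2 rfl)]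
        · have hlen : cs'.length ≤ p := by
            by_contra hlt
            exact hc ⟨by omega, hb⟩
          rw [pvG_of_len_le cs' b mc ml q best (by omega)]

theorem pvE_le (L : Nat) (m : Int) : pvE L m ≤ L := by
  unfold pvE
  split_ifs <;> omega

theorem pvFind_bridge (cs b : List Char) (m : Int) (k : Nat) :
    PySem.Chars.findFrom cs b (k : Int) (some m)
      = PySem.Chars.findFrom (cs.take (pvE cs.length m)) b (k : Int) none := by
  have hE : pvE cs.length m ≤ cs.length := pvE_le _ _
  simp only [PySem.Chars.findFrom]
  have hlen : (cs.take (pvE cs.length m)).length = pvE cs.length m := by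
    simp [List.length_take, hE]
  have hst : ¬ ((k : Int) < 0) := by omega
  rw [if_neg hst, if_neg hst]
  have hEeq : (if (cs.length : Int) < m then (cs.length : Int)
      else if m < 0 then (if m + cs.length < 0 then 0 else m + cs.length) else m)
      = ((pvE cs.length m : Nat) : Int) := by
    unfold pvE
    split_ifs <;> omega
  rw [hlen, hEeq]
  have htoNat : ((pvE cs.length m : Nat) : Int).toNat = pvE cs.length m := by omega
  rw [htoNat, List.take_take]
  have hmin : min (pvE cs.length m) (pvE cs.length m) = pvE cs.length m := by omega
  rw [hmin]

theorem pvFindFrom_gt (s b : List Char) (k : Nat) (h : s.length < k) :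
    PySem.Chars.findFrom s b (k : Int) none = -1 := by
  simp only [PySem.Chars.findFrom]
  have hst : ¬ ((k : Int) < 0) := by omega
  rw [if_neg hst, if_pos (by exact_mod_cast h)]

theorem pvALoop_eq_pvG (cs b : List Char) (ml mc : Int) (hb : b ≠ []) :
    ∀ (fuel start : Nat) (best : Int), (cs.take (pvE cs.length ml)).length - start < fuel →
      pvALoop cs b ml mc start best fuel = pvG (cs.take (pvE cs.length ml)) b mc ml start best := by
  have hbpos : 0 < b.length := List.length_pos_iff.mpr hb
  intro fuel
  induction fuel with
  | zero => intro start best h; omega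
  | succ fuel ih =>
    intro start best hfuel
    simp only [pvALoop, pvFind_bridge]
    by_cases hgt : (cs.take (pvE cs.length ml)).length < start
    · rw [pvFindFrom_gt _ _ _ hgt, if_pos (by norm_num),
        pvG_of_len_le _ _ _ _ _ _ (Nat.le_of_lt hgt)]
    · have hle : start ≤ (cs.take (pvE cs.length ml)).length := by omega
      by_cases hq : PySem.Chars.findFrom (cs.take (pvE cs.length ml)) b (start : Int) none = -1
      · rw [hq, if_pos (by norm_num)]
        have hninf : ¬ b <:+: (cs.take (pvE cs.length ml)).drop start :=
          (PySem.Chars.findFrom_natCast_eq_neg_one_iff _ _ _ hle).mp hq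
        rw [pvG_stop _ _ _ _ _ _ hninf]
      · obtain ⟨h1, h2, h3⟩ := PySem.Chars.findFrom_natCast_spec _ b _ hle hq
        set q : Int := PySem.Chars.findFrom (cs.take (pvE cs.length ml)) b (start : Int) none with hqdef
        have hq0 : 0 ≤ q := le_trans (by exact_mod_cast Nat.zero_le start) h1
        have hqcast : ((q.toNat : Nat) : Int) = q := Int.toNat_of_nonneg hq0
        have hqlen : q.toNat < (cs.take (pvE cs.length ml)).length := by
          by_contra hge
          have : (cs.take (pvE cs.length ml)).drop q.toNat = [] :=
            List.drop_eq_nil_iff.mpr (by omega)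
          rw [this] at h2
          exact hb (List.prefix_nil.mp h2)
        have hstartle : start ≤ q.toNat := by omega
        rw [if_neg (by omega)]
        rw [ih (q.toNat + b.length) _ (by omega)]
        rw [pvG_skip _ _ _ _ q.toNat start best hstartle (fun i hi1 hi2 => h3 i hi1 hi2)]
        conv_rhs => rw [pvG]
        rw [dif_pos ⟨hqlen, hb⟩, if_pos h2]
        rw [show ((q.toNat : Nat) : Int) + (b.length : Int) = q + (b.length : Int) by rw [hqcast]]

theorem pvALoop_neg (cs b : List Char) (ml mc : Int) (hml : ml < 0) :
    ∀ (fuel start : Nat) (best : Int), pvALoop cs b ml mc start best fuel = best := by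
  intro fuel
  induction fuel with
  | zero => intro start best; rfl
  | succ fuel ih =>
    intro start best
    rw [pvALoop]
    by_cases h : PySem.Chars.findFrom cs b (start : Int) (some ml) < 0
    · simp only [if_pos h]
    · simp only [if_neg h]
      have hno : ¬ (mc ≤ PySem.Chars.findFrom cs b (start : Int) (some ml) + (b.length : Int) ∧
          PySem.Chars.findFrom cs b (start : Int) (some ml) + (b.length : Int) ≤ ml) := by
        intro hcc
        have h0 : (0 : Int) ≤ PySem.Chars.findFrom cs b (start : Int) (some ml) := by omega
        have h1 : (0 : Int) ≤ (b.length : Int) := Int.natCast_nonneg _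
        omega
      rw [if_neg hno]
      exact ih _ _

theorem pv_foldl_congr {α β : Type} (l : List α) (f g : β → α → β) :
    ∀ b, (∀ x ∈ l, ∀ y, f y x = g y x) → l.foldl f b = l.foldl g b := by
  induction l with
  | nil => intro b _; rfl
  | cons x l ih =>
    intro b h
    rw [List.foldl_cons, List.foldl_cons, h x (List.mem_cons_self) b]
    exact ih _ (fun y hy => h y (List.mem_cons_of_mem _ hy))

-- splitOn.go's accumulator is just prepended (reversed) to the result
theorem pvGo_acc (sep : List Char) :
    ∀ (fuel : Nat) (l cur : List Char) (accs : List (List Char)),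
      PySem.Chars.splitOn.go sep fuel l cur accs
        = accs.reverse ++ PySem.Chars.splitOn.go sep fuel l cur [] := by
  intro fuel
  induction fuel with
  | zero => intro l cur accs; simp [PySem.Chars.splitOn.go]
  | succ fuel ih =>
    intro l cur accs
    cases l with
    | nil => simp [PySem.Chars.splitOn.go]
    | cons c rest =>
      by_cases h : sep.isPrefixOf (c :: rest) = true
      · rw [PySem.Chars.splitOn.go, if_pos h]
        conv_rhs => rw [PySem.Chars.splitOn.go, if_pos h]
        rw [ih _ _ (cur.reverse :: accs), ih _ _ [cur.reverse]]
        simp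
      · rw [PySem.Chars.splitOn.go, if_neg h]
        conv_rhs => rw [PySem.Chars.splitOn.go, if_neg h]
        exact ih _ _ accs

theorem pvGo_ne (sep : List Char) :
    ∀ (fuel : Nat) (l cur : List Char), PySem.Chars.splitOn.go sep fuel l cur [] ≠ [] := by
  intro fuel
  induction fuel with
  | zero => intro l cur; simp [PySem.Chars.splitOn.go]
  | succ fuel ih =>
    intro l cur
    cases l with
    | nil => simp [PySem.Chars.splitOn.go]
    | cons c rest =>
      by_cases h : sep.isPrefixOf (c :: rest) = true
      · rw [PySem.Chars.splitOn.go, if_pos h, pvGo_acc sep fuel _ _ [cur.reverse]]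
        simp
      · rw [PySem.Chars.splitOn.go, if_neg h]
        exact ih _ _

-- master lemma: the prefix-sum fold over the split pieces equals the greedy machine
theorem pvSplit_fold (cs' sep : List Char) (mc ml : Int) (hsep : sep ≠ [])
    (hml : (cs'.length : Int) ≤ ml) :
    ∀ (fuel p q : Nat) (best : Int), q ≤ p → p ≤ cs'.length → cs'.length - p < fuel →
    ((PySem.Chars.splitOn.go sep fuel (cs'.drop p) ((cs'.drop q).take (p - q)).reverse []).dropLast.foldl
        (fun (st : Int × Int) part =>
          (st.1 + (part.length : Int) + (sep.length : Int),
           if mc ≤ st.1 + (part.length : Int) + (sep.length : Int) then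
             max st.2 (st.1 + (part.length : Int) + (sep.length : Int)) else st.2))
        ((q : Int), best)).2
      = pvG cs' sep mc ml p best := by
  have hsl : 0 < sep.length := List.length_pos_iff.mpr hsep
  intro fuel
  induction fuel with
  | zero => intro p q best h1 h2 h3; omega
  | succ fuel ih =>
    intro p q best hqp hp hfuel
    rcases hdrop : cs'.drop p with _ | ⟨c, rest⟩
    · have hplen : cs'.length ≤ p := by
        have := List.drop_eq_nil_iff.mp hdrop
        omega
      rw [pvG_of_len_le _ _ _ _ _ _ hplen, PySem.Chars.splitOn.go]
      simp
      omega
    · have hplt : p < cs'.length := by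
        have h := congrArg List.length hdrop
        simp [List.length_drop] at h
        omega
      have hcurlen : (((cs'.drop q).take (p - q)).reverse).length = p - q := by
        simp [List.length_take, List.length_drop]
        omega
      by_cases hpre : sep.isPrefixOf (c :: rest) = true
      · have hpre' : sep <+: cs'.drop p := by
          rw [hdrop]; exact List.isPrefixOf_iff_prefix.mp hpre
        have hse : p + sep.length ≤ cs'.length := by
          have := hpre'.length_le
          simp [List.length_drop] at this
          omega
        have hdd : (c :: rest).drop sep.length = cs'.drop (p + sep.length) := by
          rw [← hdrop, List.drop_drop]
        have hmlcond : ((p + sep.length : Nat) : Int) ≤ ml := by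
          have h1 : ((p + sep.length : Nat) : Int) ≤ (cs'.length : Int) := by exact_mod_cast hse
          omega
        rw [PySem.Chars.splitOn.go, if_pos hpre,
          pvGo_acc sep fuel _ _ [((cs'.drop q).take (p - q)).reverse.reverse], hdd,
          List.dropLast_append_of_ne_nil (pvGo_ne sep fuel _ _), List.foldl_append]
        simp only [List.reverse_cons, List.reverse_nil, List.nil_append, List.reverse_reverse,
          List.foldl_cons, List.foldl_nil]
        have e1 : (q : Int) + (((cs'.drop q).take (p - q)).length : Int) + (sep.length : Int)
            = ((p + sep.length : Nat) : Int) := by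
          rw [List.length_take, List.length_drop]
          push_cast
          omega
        have key := fun B => ih (p + sep.length) (p + sep.length) B le_rfl hse (by omega)
        simp only [Nat.sub_self, List.take_zero, List.reverse_nil] at key
        conv_rhs => rw [pvG]
        rw [dif_pos ⟨hplt, hsep⟩, if_pos hpre']
        have hcast : (p : Int) + (sep.length : Int) = ((p + sep.length : Nat) : Int) := by
          push_cast; ring
        rw [hcast, e1]
        by_cases hmc : mc ≤ ((p + sep.length : Nat) : Int)
        · rw [if_pos hmc, if_pos ⟨hmc, hmlcond⟩]
          exact key _
        · rw [if_neg hmc, if_neg (fun hc => hmc hc.1)]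
          exact key _
      · have hnpre : ¬ sep <+: cs'.drop p := by
          rw [hdrop]
          intro h
          exact hpre (List.isPrefixOf_iff_prefix.mpr h)
        rw [PySem.Chars.splitOn.go, if_neg hpre]
        have hrest : rest = cs'.drop (p + 1) := by
          have := congrArg List.tail hdrop
          simpa [List.tail_drop] using this.symm
        have hc : cs'[p]? = some c := by
          have := congrArg List.head? hdrop
          simpa [List.head?_drop] using this
        have hcons : (c :: ((cs'.drop q).take (p - q)).reverse)
            = ((cs'.drop q).take (p + 1 - q)).reverse := by
          have h1 : p + 1 - q = (p - q) + 1 := by omega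
          rw [h1, List.take_succ]
          have h2 : (cs'.drop q)[p - q]? = some c := by
            rw [List.getElem?_drop]
            have : q + (p - q) = p := by omega
            rw [this, hc]
          rw [h2]
          simp
        rw [hcons, hrest]
        rw [ih (p + 1) q best (by omega) (by omega) (by omega)]
        conv_rhs => rw [pvG]
        rw [dif_pos ⟨hplt, hsep⟩, if_neg hnpre]

-- ===== VERDICT (by name: the statement is the Claim_ definition above) =====
theorem last_boundary_cut_py_spec : Claim_equal_last_boundary_cut_py := by
  intro text boundaries ml mc _ hpre
  unfold Spec_last_boundary_cut_py last_boundary_cut_py last_boundary_cut_py_alt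
  simp only []
  by_cases hml : ml < 0
  · have hA : boundaries.foldl
        (fun best boundary => pvALoop text.toList boundary.toList ml mc 0 best (text.toList.length + 2)) 0
        = boundaries.foldl (fun (y : Int) (_ : String) => y) 0 :=
      pv_foldl_congr _ _ _ 0 (fun x _ y => pvALoop_neg text.toList x.toList ml mc hml _ _ _)
    have hwin : PySem.List.slice text.toList none (some (max ml 0)) = ([] : List Char) := by
      have : max ml 0 = 0 := by omega
      rw [this]
      simp [PySem.List.slice]
    rw [hA, pv_foldl_const, hwin]
    have hB : ∀ b : String, PySem.Chars.splitOn ([] : List Char) b.toList = [[]] := by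
      intro b
      simp [PySem.Chars.splitOn, PySem.Chars.splitOn.go]
    have : boundaries.foldl (fun best b =>
        ((PySem.Chars.splitOn ([] : List Char) b.toList).dropLast.foldl
          (fun (st : Int × Int) part =>
            (st.1 + (part.length : Int) + (b.toList.length : Int),
             if mc ≤ st.1 + (part.length : Int) + (b.toList.length : Int) then
               max st.2 (st.1 + (part.length : Int) + (b.toList.length : Int)) else st.2)) (0, best)).2) 0
        = boundaries.foldl (fun (y : Int) (_ : String) => y) 0 := by
      apply pv_foldl_congr
      intro b _ y
      rw [hB b]
      simp
    rw [this, pv_foldl_const]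
  · have hml' : 0 ≤ ml := by omega
    have hmax : max ml 0 = ml := by omega
    have hc : ∀ L : Nat, PySem.List.clampIdx L ml = min (pvE L ml) L := by
      intro L
      unfold PySem.List.clampIdx pvE
      split_ifs <;> omega
    have hwin : PySem.List.slice text.toList none (some (max ml 0))
        = text.toList.take (pvE text.toList.length ml) := by
      rw [hmax]
      show List.take (PySem.List.clampIdx text.toList.length ml - 0) (List.drop 0 text.toList) = _
      rw [Nat.sub_zero, List.drop_zero, hc, ← List.take_take, List.take_length]
    have h3 : (pvE text.toList.length ml : Int) ≤ ml := by
      unfold pvE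
      split_ifs <;> omega
    have htake : (text.toList.take (pvE text.toList.length ml)).length ≤ text.toList.length := by
      simp [List.length_take]
    have hWlen : ((text.toList.take (pvE text.toList.length ml)).length : Int) ≤ ml := by
      simp only [List.length_take]
      omega
    rw [hwin]
    apply pv_foldl_congr
    intro b hb y
    have hbne : b.toList ≠ [] := by
      intro h
      exact hpre b hb (by
        have h2 := congrArg String.ofList h
        simpa using h2)
    rw [pvALoop_eq_pvG text.toList b.toList ml mc hbne _ _ _ (by omega)]
    rw [PySem.Chars.splitOn]
    have key := pvSplit_fold (text.toList.take (pvE text.toList.length ml)) b.toList mc ml hbne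
      hWlen ((text.toList.take (pvE text.toList.length ml)).length + 1) 0 0 y le_rfl
      (Nat.zero_le _) (by omega)
    exact key.symm
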